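-- pv_equiv track=rewrite | github.com/agustinobillgate/server-less | image/src/functions/additional_functions.py | update_key_delimited_data
-- ===== SOURCE A (Python) =====
-- def update_key_delimited_data(input_str,delimiter,key,value=""):
--     foundFlag = False
--
--     list = input_str.split(delimiter)
--     output = ""
--     for data in list:
--         if data.startswith(key) and not foundFlag:
--             output += key + value + ";"
--             foundFlag = True
--         else:
--             output += data + ";"
--
--     if not foundFlag:
--         output += key + value
--
--     return output
-- ===== SOURCE B (Python) =====
-- def update_key_delimited_data(input_str, delimiter, key, value=""):
--     tokens = input_str.split(delimiter)
--     idx = next((i for i, t in enumerate(tokens) if t.startswith(key)), None)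
--     if idx is None:
--         return ";".join(tokens + [key + value])
--     tokens[idx] = key + value
--     return ";".join(tokens) + ";"
-- ===== Notes on version B (the rewrite author's own statement) =====
-- stated objective: simpler
-- what changed: Instead of accumulating output token-by-token with a found flag inside the loop, B locates the index of the first matching token, replaces it in the token list, and emits the result with a single ';'.join (appending key+value to the token list when no token matches); Pre_ excludes only delimiter == '', where str.split raises ValueError in both.
import Mathlib
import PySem

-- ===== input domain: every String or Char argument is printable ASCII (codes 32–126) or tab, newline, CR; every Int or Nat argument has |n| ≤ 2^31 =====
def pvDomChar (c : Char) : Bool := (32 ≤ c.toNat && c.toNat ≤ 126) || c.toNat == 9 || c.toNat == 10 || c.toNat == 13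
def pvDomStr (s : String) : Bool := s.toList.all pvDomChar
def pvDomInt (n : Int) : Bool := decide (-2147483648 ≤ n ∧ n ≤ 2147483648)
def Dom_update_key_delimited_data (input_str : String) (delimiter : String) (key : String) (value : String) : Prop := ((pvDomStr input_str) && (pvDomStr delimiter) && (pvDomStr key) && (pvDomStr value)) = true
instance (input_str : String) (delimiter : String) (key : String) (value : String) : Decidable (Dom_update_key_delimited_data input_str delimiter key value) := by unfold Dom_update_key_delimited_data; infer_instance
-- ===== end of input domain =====

-- B replaces A's token-by-token accumulation with a found flag by: find the index of the
-- first matching token, replace it, and join once ('simpler' objective; same O(n) cost).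

-- ===== PORT A =====
-- the loop body of A: 'if data.startswith(key) and not foundFlag: output += key+value+";" … else: output += data+";"'
def pvStepA (k v : List Char) (st : List Char × Bool) (data : List Char) : List Char × Bool :=
  if PySem.Chars.startswith data k && !st.2 then (st.1 ++ (k ++ v ++ [';']), true)
  else (st.1 ++ (data ++ [';']), st.2)

def update_key_delimited_data (input_str : String) (delimiter : String) (key : String) (value : String) : String :=
  match PySem.Chars.split? input_str.toList delimiter.toList with
  | none => ""   -- delimiter = "": Python raises ValueError here; excluded by Pre_
  | some list =>
    let r := list.foldl (pvStepA key.toList value.toList) ([], false)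
    String.ofList (if !r.2 then r.1 ++ (key.toList ++ value.toList) else r.1)

-- ===== PORT B =====
def update_key_delimited_data_alt (input_str : String) (delimiter : String) (key : String) (value : String) : String :=
  match PySem.Chars.split? input_str.toList delimiter.toList with
  | none => ""   -- delimiter = "": Python raises ValueError here; excluded by Pre_
  | some tokens =>
    match tokens.findIdx? (fun t => PySem.Chars.startswith t key.toList) with
    | none => String.ofList (PySem.Chars.join [';'] (tokens ++ [key.toList ++ value.toList]))
    | some i => String.ofList (PySem.Chars.join [';'] (tokens.set i (key.toList ++ value.toList)) ++ [';'])

-- ===== PRECONDITION & SPEC =====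
-- Pre_ excludes only delimiter = "", on which Python's str.split raises ValueError (in A and in B alike).
def Pre_update_key_delimited_data (input_str : String) (delimiter : String) (key : String) (value : String) : Prop :=
  delimiter ≠ ""
instance (input_str : String) (delimiter : String) (key : String) (value : String) : Decidable (Pre_update_key_delimited_data input_str delimiter key value) := by unfold Pre_update_key_delimited_data; infer_instance

def pvWitness_update_key_delimited_data : String × String × String × String := ("a=1;b=2", ";", "b=", "7")

def Spec_update_key_delimited_data (input_str : String) (delimiter : String) (key : String) (value : String) (out : String) : Prop := out = update_key_delimited_data_alt input_str delimiter key value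
instance (input_str : String) (delimiter : String) (key : String) (value : String) (out : String) : Decidable (Spec_update_key_delimited_data input_str delimiter key value out) := by unfold Spec_update_key_delimited_data; infer_instance

-- ===== CLAIM (what is proved, stated in full; the proofs are below) =====
def Claim_equal_update_key_delimited_data : Prop := ∀ (input_str : String) (delimiter : String) (key : String) (value : String), Dom_update_key_delimited_data input_str delimiter key value → Pre_update_key_delimited_data input_str delimiter key value → Spec_update_key_delimited_data input_str delimiter key value (update_key_delimited_data input_str delimiter key value)

-- ===== LEMMAS AND PROOFS =====

-- A's loop after the flag is set: every remaining token is emitted as 'token ++ ";"'.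
lemma foldA_true (k v : List Char) (ts : List (List Char)) (out : List Char) :
    ts.foldl (pvStepA k v) (out, true) = (out ++ (ts.map (· ++ [';'])).flatten, true) := by
  induction ts generalizing out with
  | nil => simp
  | cons t ts ih => simp [pvStepA, ih]

-- A's loop from flag = false, characterised by the index of the first matching token.
lemma foldA_false (k v : List Char) (ts : List (List Char)) (out : List Char) :
    ts.foldl (pvStepA k v) (out, false) =
      match ts.findIdx? (fun t => PySem.Chars.startswith t k) with
      | none => (out ++ (ts.map (· ++ [';'])).flatten, false)
      | some i => (out ++ ((ts.set i (k ++ v)).map (· ++ [';'])).flatten, true) := by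
  induction ts generalizing out with
  | nil => simp
  | cons t ts ih =>
    by_cases h : PySem.Chars.startswith t k = true
    · simp [pvStepA, h, List.findIdx?_cons, foldA_true]
    · simp only [List.foldl_cons, pvStepA, h, List.findIdx?_cons, Bool.false_and, if_neg,
        Bool.false_eq_true, not_false_eq_true, ih]
      cases hf : ts.findIdx? (fun t => PySem.Chars.startswith t k) <;>
        simp [List.append_assoc]

-- join with ";" of xs ++ [x] is each xs-token followed by ';', then x bare.
lemma join_append_singleton (xs : List (List Char)) (x : List Char) :
    PySem.Chars.join [';'] (xs ++ [x]) = (xs.map (· ++ [';'])).flatten ++ x := by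
  induction xs with
  | nil => simp [PySem.Chars.join_singleton]
  | cons y ys ih =>
    cases ys with
    | nil => simp [PySem.Chars.join_cons_cons, PySem.Chars.join_singleton]
    | cons z zs => simp [PySem.Chars.join_cons_cons, List.append_assoc] at ih ⊢; simp [ih]

-- join of a NONEMPTY list followed by ';' is the same flatten shape.
lemma join_nonempty_semi (xs : List (List Char)) (h : xs ≠ []) :
    PySem.Chars.join [';'] xs ++ [';'] = (xs.map (· ++ [';'])).flatten := by
  obtain ⟨ys, y, rfl⟩ := (List.eq_nil_or_concat xs).resolve_left h
  rw [List.concat_eq_append, join_append_singleton]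
  simp [List.append_assoc]

-- ===== VERDICT (by name: the statement is the Claim_ definition above) =====
theorem update_key_delimited_data_spec : Claim_equal_update_key_delimited_data := by
  intro input_str delimiter key value _ _
  unfold Spec_update_key_delimited_data update_key_delimited_data update_key_delimited_data_alt
  cases hs : PySem.Chars.split? input_str.toList delimiter.toList with
  | none => rfl
  | some ts =>
    simp only [foldA_false]
    cases hf : ts.findIdx? (fun t => PySem.Chars.startswith t key.toList) with
    | none =>
      simp [join_append_singleton]
    | some i =>
      have hne : ts ≠ [] := by
        intro h; subst h; simp at hf
      have hset : ts.set i (key.toList ++ value.toList) ≠ [] := by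
        intro h
        exact hne (List.eq_nil_of_length_eq_zero (by simpa using congrArg List.length h))
      simp [join_nonempty_semi _ hset]
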